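-- pv_equiv track=rewrite | github.com/aadityaanaik/xpenz | fetch.py | get_search_criteria
-- ===== SOURCE A (Python) =====
-- def get_search_criteria(senders_config, since_date):
--     pair_criteria = [
--         f'(FROM "{sender}" SUBJECT "{details["subject"]}")'
--         for sender, details in senders_config.items()
--     ]
--
--     if not pair_criteria:
--         return ""  # No valid criteria to build a query from
--
--     if len(pair_criteria) == 1:
--         combined_criteria = pair_criteria[0]
--     else:
--         combined_criteria = pair_criteria[-1]
--         for criterion in reversed(pair_criteria[:-1]):
--             combined_criteria = f'(OR {criterion} {combined_criteria})'
--
--     # The final query combines the sender/subject logic with the date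
--     final_query_parts = [combined_criteria]
--     if since_date:
--         final_query_parts.append(f'SINCE {since_date}')
--
--     return ' '.join(final_query_parts)
-- ===== SOURCE B (Python) =====
-- def get_search_criteria(senders_config, since_date):
--     pair_criteria = [
--         f'(FROM "{sender}" SUBJECT "{details["subject"]}")'
--         for sender, details in senders_config.items()
--     ]
--     if not pair_criteria:
--         return ""
--     # Forward construction of the same right-nested OR chain: open all the
--     # "(OR c " prefixes left-to-right, put the last criterion, close all parens.
--     combined = (
--         "".join(f'(OR {c} ' for c in pair_criteria[:-1])
--         + pair_criteria[-1]
--         + ")" * (len(pair_criteria) - 1)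
--     )
--     return combined + (f' SINCE {since_date}' if since_date else '')
-- ===== Notes on version B (the rewrite author's own statement) =====
-- stated objective: simpler
-- what changed: Replaces the reversed right-fold that rebuilds the nested OR string at every step with a single forward pass: join the '(OR c ' prefixes, append the last criterion, then close all parentheses at once; the 1-element special case disappears.
import Mathlib
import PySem

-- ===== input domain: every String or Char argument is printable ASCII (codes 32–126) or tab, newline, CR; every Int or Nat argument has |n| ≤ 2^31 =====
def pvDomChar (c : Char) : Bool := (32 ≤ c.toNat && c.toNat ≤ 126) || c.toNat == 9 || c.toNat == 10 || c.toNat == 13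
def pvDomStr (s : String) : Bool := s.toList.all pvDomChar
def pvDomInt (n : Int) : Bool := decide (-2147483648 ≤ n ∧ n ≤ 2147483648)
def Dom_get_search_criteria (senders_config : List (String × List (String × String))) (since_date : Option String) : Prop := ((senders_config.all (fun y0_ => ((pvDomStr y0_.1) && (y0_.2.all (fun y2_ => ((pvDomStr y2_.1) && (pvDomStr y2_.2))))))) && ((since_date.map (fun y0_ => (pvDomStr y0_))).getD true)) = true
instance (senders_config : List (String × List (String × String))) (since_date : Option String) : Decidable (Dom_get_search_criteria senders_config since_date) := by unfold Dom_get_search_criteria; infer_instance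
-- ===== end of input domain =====

-- B builds the same right-nested OR chain in one forward pass (join prefixes, last criterion,
-- close all parens) instead of A's reversed fold; objective: simpler.

-- ===== PORT A =====
-- details["subject"]: first-match lookup; Pre_ guarantees the key is present (else Python raises KeyError)
def pvPair (p : String × List (String × String)) : String :=
  "(FROM \"" ++ p.1 ++ "\" SUBJECT \"" ++ (p.2.lookup "subject").getD "" ++ "\")"

def get_search_criteria (senders_config : List (String × List (String × String))) (since_date : Option String) : String :=
  let pair_criteria := senders_config.map pvPair
  if pair_criteria = [] then ""
  else
    let combined_criteria :=
      if pair_criteria.length = 1 then pair_criteria.headD ""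
      else
        -- for criterion in reversed(pair_criteria[:-1]): combined = f'(OR {criterion} {combined})'
        (pair_criteria.dropLast.reverse).foldl
          (fun acc c => "(OR " ++ c ++ " " ++ acc ++ ")") (pair_criteria.getLastD "")
    -- ' '.join of [combined] (+ ['SINCE …'] if since_date truthy)
    match since_date with
    | some s => if s = "" then combined_criteria else combined_criteria ++ " " ++ ("SINCE " ++ s)
    | none => combined_criteria

-- ===== PORT B =====
-- ")" * n
def pvClose (n : Nat) : String :=
  match n with
  | 0 => ""
  | n + 1 => pvClose n ++ ")"

def get_search_criteria_alt (senders_config : List (String × List (String × String))) (since_date : Option String) : String :=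
  let pair_criteria := senders_config.map pvPair
  if pair_criteria = [] then ""
  else
    let combined :=
      (pair_criteria.dropLast.foldl (fun acc c => acc ++ ("(OR " ++ c ++ " ")) "")
        ++ pair_criteria.getLastD "" ++ pvClose (pair_criteria.length - 1)
    combined ++ (match since_date with
                 | some s => if s = "" then "" else " SINCE " ++ s
                 | none => "")

-- ===== PRECONDITION & SPEC =====
-- Pre_ excludes inputs where some details dict has no "subject" key: there Python A (and B) raise KeyError.
def Pre_get_search_criteria (senders_config : List (String × List (String × String))) (since_date : Option String) : Prop :=
  ∀ p ∈ senders_config, "subject" ∈ p.2.map Prod.fst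
instance (senders_config : List (String × List (String × String))) (since_date : Option String) : Decidable (Pre_get_search_criteria senders_config since_date) := by unfold Pre_get_search_criteria; infer_instance

def pvWitness_get_search_criteria : (List (String × List (String × String))) × Option String :=
  ([("alice@example.com", [("subject", "Bill")]), ("bob@example.com", [("subject", "Invoice")])], some "01-Jan-2024")

def Spec_get_search_criteria (senders_config : List (String × List (String × String))) (since_date : Option String) (out : String) : Prop := out = get_search_criteria_alt senders_config since_date
instance (senders_config : List (String × List (String × String))) (since_date : Option String) (out : String) : Decidable (Spec_get_search_criteria senders_config since_date out) := by unfold Spec_get_search_criteria; infer_instance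

-- ===== CLAIM (what is proved, stated in full; the proofs are below) =====
def Claim_equal_get_search_criteria : Prop := ∀ (senders_config : List (String × List (String × String))) (since_date : Option String), Dom_get_search_criteria senders_config since_date → Pre_get_search_criteria senders_config since_date → Spec_get_search_criteria senders_config since_date (get_search_criteria senders_config since_date)

-- ===== LEMMAS AND PROOFS =====

-- shifting the accumulator out of B's prefix fold
theorem pv_prefix_shift (l : List String) (a : String) :
    l.foldl (fun acc c => acc ++ ("(OR " ++ c ++ " ")) a
      = a ++ l.foldl (fun acc c => acc ++ ("(OR " ++ c ++ " ")) "" := by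
  induction l generalizing a with
  | nil => simp [List.foldl]
  | cons x xs ih =>
      simp only [List.foldl]
      rw [ih ("" ++ ("(OR " ++ x ++ " ")), ih (a ++ ("(OR " ++ x ++ " "))]
      simp [String.append_assoc]

-- the core equality: A's reversed fold = B's forward construction, over any prefix list l
theorem pv_comb_eq (l : List String) (last : String) :
    (l.reverse).foldl (fun acc c => "(OR " ++ c ++ " " ++ acc ++ ")") last
      = l.foldl (fun acc c => acc ++ ("(OR " ++ c ++ " ")) "" ++ last ++ pvClose l.length := by
  induction l with
  | nil => simp [pvClose]
  | cons x xs ih =>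
      rw [List.reverse_cons, List.foldl_append]
      simp only [List.foldl_cons, List.foldl_nil, List.length_cons, pvClose]
      rw [ih, pv_prefix_shift xs ("" ++ ("(OR " ++ x ++ " "))]
      simp [String.append_assoc]

theorem get_search_criteria_eq (senders_config : List (String × List (String × String))) (since_date : Option String) :
    get_search_criteria senders_config since_date = get_search_criteria_alt senders_config since_date := by
  unfold get_search_criteria get_search_criteria_alt
  cases h : senders_config.map pvPair with
  | nil => simp
  | cons x xs =>
      simp only [reduceCtorEq, if_false]
      have hcomb :
          (if (x :: xs).length = 1 then (x :: xs).headD ""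
           else ((x :: xs).dropLast.reverse).foldl
             (fun acc c => "(OR " ++ c ++ " " ++ acc ++ ")") ((x :: xs).getLastD ""))
          = (x :: xs).dropLast.foldl (fun acc c => acc ++ ("(OR " ++ c ++ " ")) ""
              ++ (x :: xs).getLastD "" ++ pvClose ((x :: xs).length - 1) := by
        rw [pv_comb_eq]
        cases xs with
        | nil => simp [pvClose]
        | cons y ys =>
            have : (x :: y :: ys).length ≠ 1 := by simp
            rw [if_neg this]
            congr 1
            simp [List.length_dropLast]
      rw [hcomb]
      cases since_date with
      | none => simp
      | some s =>
          have hlit : (" " : String) ++ "SINCE " = " SINCE " := rfl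
          by_cases hs : s = ""
          · simp [hs]
          · simp only [if_neg hs]
            rw [String.append_assoc, ← String.append_assoc (s₁ := " ") (s₂ := "SINCE ") (s₃ := s), hlit]

-- ===== VERDICT (by name: the statement is the Claim_ definition above) =====
theorem get_search_criteria_spec : Claim_equal_get_search_criteria := by
  intro sc sd _ _
  unfold Spec_get_search_criteria
  exact get_search_criteria_eq sc sd
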